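-- pv_equiv track=rewrite | github.com/ArgoCanada/meds-dmqc | report/create_report.py | write_bullets
-- ===== SOURCE A (Python) =====
-- def write_bullets(bullets, indent):
--
--     i = 0
--     lines = [f'\\begin{{itemize}}']
--     while i < len(bullets):
--         if indent[i]:
--             lines.append(f'\t\\begin{{itemize}}')
--             while i < len(bullets) and indent[i]:
--                 lines.append(f'\t\t\\item {bullets[i]}')
--                 i += 1
--             lines.append(f'\t\\end{{itemize}}')
--         else:
--             lines.append(f'\t\\item {bullets[i]}')
--             i += 1
--     lines.append(f'\\end{{itemize}}\n')
--
--     s = ''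
--     for l in lines:
--         s = s + l + '\n'
--
--     return s
-- ===== SOURCE B (Python) =====
-- def write_bullets(bullets, indent):
--     # Group consecutive items by their indent flag, then render each run at once.
--     runs = []
--     for i in range(len(bullets)):
--         k = indent[i]
--         if runs and runs[-1][0] == k:
--             runs[-1][1].append(bullets[i])
--         else:
--             runs.append([k, [bullets[i]]])
--     lines = ['\\begin{itemize}']
--     for k, items in runs:
--         if k:
--             lines.append('\t\\begin{itemize}')
--             lines.extend('\t\t\\item ' + b for b in items)
--             lines.append('\t\\end{itemize}')
--         else:
--             lines.extend('\t\\item ' + b for b in items)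
--     lines.append('\\end{itemize}\n')
--     return '\n'.join(lines) + '\n'
-- ===== Notes on version B (the rewrite author's own statement) =====
-- stated objective: faster
-- what changed: B first groups consecutive bullets into runs keyed by the indent flag, then renders each run at once and joins the lines with '\n'.join, replacing A's nested while loops with manual index stepping and its quadratic repeated string concatenation s = s + l + '\n'.
import Mathlib
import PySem

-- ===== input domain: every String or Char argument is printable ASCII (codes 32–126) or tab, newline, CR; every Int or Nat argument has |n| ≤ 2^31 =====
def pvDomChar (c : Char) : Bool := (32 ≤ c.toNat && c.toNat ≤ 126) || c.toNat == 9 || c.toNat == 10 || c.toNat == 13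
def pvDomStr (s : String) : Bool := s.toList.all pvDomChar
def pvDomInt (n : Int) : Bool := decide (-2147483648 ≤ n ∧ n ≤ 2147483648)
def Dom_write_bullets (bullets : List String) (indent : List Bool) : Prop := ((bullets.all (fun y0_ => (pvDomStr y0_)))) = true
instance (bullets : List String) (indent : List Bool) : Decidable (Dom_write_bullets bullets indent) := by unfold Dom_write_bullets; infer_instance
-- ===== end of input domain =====

-- B groups consecutive items with equal indent flag into runs, renders each run at once and
-- joins the lines with '\n'.join, instead of A's index-driven nested while loops with quadratic
-- repeated string concatenation (measured faster at large sizes in a timing run).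

-- Python's 'a + b' on strings, kernel-transparent (Lean's own String.append is opaque)
def pvCat (a b : String) : String := String.ofList (a.toList ++ b.toList)

-- ===== PORT A =====
-- the inner 'while i < len(bullets) and indent[i]:' loop; fuel bounds the iterations
def pvInnerA (bullets : List String) (indent : List Bool) : Nat → Nat → List String → Nat × List String
  | 0, i, lines => (i, lines)
  | fuel+1, i, lines =>
    if i < bullets.length ∧ PySem.List.pyGetD indent (i : Int) false = true then
      pvInnerA bullets indent fuel (i+1)
        (lines ++ [pvCat "\t\t\\item " (PySem.List.pyGetD bullets (i : Int) "")])
    else (i, lines)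

-- the outer 'while i < len(bullets):' loop
def pvOuterA (bullets : List String) (indent : List Bool) : Nat → Nat → List String → List String
  | 0, _, lines => lines
  | fuel+1, i, lines =>
    if i < bullets.length then
      if PySem.List.pyGetD indent (i : Int) false = true then
        let p := pvInnerA bullets indent bullets.length i (lines ++ ["\t\\begin{itemize}"])
        pvOuterA bullets indent fuel p.1 (p.2 ++ ["\t\\end{itemize}"])
      else
        pvOuterA bullets indent fuel (i+1)
          (lines ++ [pvCat "\t\\item " (PySem.List.pyGetD bullets (i : Int) "")])
    else lines

def write_bullets (bullets : List String) (indent : List Bool) : String :=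
  let lines := pvOuterA bullets indent (bullets.length + 1) 0 ["\\begin{itemize}"]
  let lines := lines ++ ["\\end{itemize}\n"]
  lines.foldl (fun s l => pvCat (pvCat s l) "\n") ""

-- ===== PORT B =====
-- Source B's 'append to the last run or start a new one'
def pvAddRun (runs : List (Bool × List String)) (k : Bool) (b : String) : List (Bool × List String) :=
  match runs.getLast? with
  | some last => if last.1 == k then runs.dropLast ++ [(k, last.2 ++ [b])] else runs ++ [(k, [b])]
  | none => runs ++ [(k, [b])]

def write_bullets_alt (bullets : List String) (indent : List Bool) : String :=
  let runs := (List.range bullets.length).foldl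
    (fun runs (i : Nat) => pvAddRun runs (PySem.List.pyGetD indent (i : Int) false)
                            (PySem.List.pyGetD bullets (i : Int) "")) []
  let lines := runs.foldl
    (fun lines r =>
      if r.1 then
        lines ++ ["\t\\begin{itemize}"] ++ r.2.map (fun b => pvCat "\t\t\\item " b)
              ++ ["\t\\end{itemize}"]
      else lines ++ r.2.map (fun b => pvCat "\t\\item " b)) ["\\begin{itemize}"]
  let lines := lines ++ ["\\end{itemize}\n"]
  pvCat (PySem.Str.join "\n" lines) "\n"

-- ===== PRECONDITION & SPEC =====
-- A indexes indent[i] for every i < len(bullets): a shorter indent raises IndexError (B too)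
def Pre_write_bullets (bullets : List String) (indent : List Bool) : Prop :=
  bullets.length ≤ indent.length
instance (bullets : List String) (indent : List Bool) : Decidable (Pre_write_bullets bullets indent) := by unfold Pre_write_bullets; infer_instance
def pvWitness_write_bullets : List String × List Bool := (["a", "b", "c"], [false, true, true])

def Spec_write_bullets (bullets : List String) (indent : List Bool) (out : String) : Prop := out = write_bullets_alt bullets indent
instance (bullets : List String) (indent : List Bool) (out : String) : Decidable (Spec_write_bullets bullets indent out) := by unfold Spec_write_bullets; infer_instance

-- ===== CLAIM (what is proved, stated in full; the proofs are below) =====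
def Claim_equal_write_bullets : Prop := ∀ (bullets : List String) (indent : List Bool), Dom_write_bullets bullets indent → Pre_write_bullets bullets indent → Spec_write_bullets bullets indent (write_bullets bullets indent)

-- ===== LEMMAS AND PROOFS =====

-- the canonical line list both programs produce, over the zipped (bullet, flag) list
def pvCanon : List (String × Bool) → List String
  | [] => []
  | (b, false) :: rest => pvCat "\t\\item " b :: pvCanon rest
  | (b, true) :: rest =>
      "\t\\begin{itemize}" ::
        ((pvCat "\t\t\\item " b :: (rest.takeWhile (·.2)).map (fun p => pvCat "\t\t\\item " p.1))
          ++ ["\t\\end{itemize}"] ++ pvCanon (rest.dropWhile (·.2)))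
termination_by l => l.length
decreasing_by
  · simp
  · have := List.length_dropWhile_le (·.2) rest; simp; omega

-- left-recursive description of B's run list
def pvGroup : List (String × Bool) → List (Bool × List String)
  | [] => []
  | (b, k) :: rest =>
      (k, b :: (rest.takeWhile (fun p => p.2 == k)).map (·.1))
        :: pvGroup (rest.dropWhile (fun p => p.2 == k))
termination_by l => l.length
decreasing_by have := List.length_dropWhile_le (fun p => p.2 == k) rest; simp; omega

theorem pvGetD_lt {α : Type} (xs : List α) (d : α) (i : Nat) (h : i < xs.length) :
    PySem.List.pyGetD xs (i : Int) d = xs[i] := by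
  simp [List.getD_eq_getElem?_getD, List.getElem?_eq_getElem h]

theorem pvZip_drop (bullets : List String) (indent : List Bool)
    (hle : bullets.length ≤ indent.length) (i : Nat) (hi : i < bullets.length) :
    (bullets.zip indent).drop i =
      (bullets[i], indent[i]'(lt_of_lt_of_le hi hle)) :: (bullets.zip indent).drop (i+1) := by
  rw [List.drop_eq_getElem_cons (by simp; omega)]
  congr 1
  exact List.getElem_zip

theorem pvZip_drop_nil (bullets : List String) (indent : List Bool) (i : Nat)
    (hi : bullets.length ≤ i) : (bullets.zip indent).drop i = [] := by
  rw [List.drop_eq_nil_iff]; simp; omega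

theorem pvCat_toList (a b : String) : (pvCat a b).toList = a.toList ++ b.toList := by
  simp [pvCat]

theorem pv_drop_takeWhile (p : α → Bool) : ∀ l : List α, l.drop (l.takeWhile p).length = l.dropWhile p := by
  intro l; induction l with
  | nil => simp
  | cons a t ih => by_cases h : p a <;> simp [h, ih]

theorem pvInnerA_spec (bullets : List String) (indent : List Bool)
    (hle : bullets.length ≤ indent.length) :
    ∀ (fuel i : Nat) (lines : List String), bullets.length ≤ fuel + i →
      pvInnerA bullets indent fuel i lines =
        (i + (((bullets.zip indent).drop i).takeWhile (·.2)).length,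
         lines ++ (((bullets.zip indent).drop i).takeWhile (·.2)).map
           (fun p => pvCat "\t\t\\item " p.1)) := by
  intro fuel
  induction fuel with
  | zero =>
    intro i lines h
    rw [pvZip_drop_nil bullets indent i (by omega)]
    simp [pvInnerA]
  | succ fuel ih =>
    intro i lines h
    by_cases hi : i < bullets.length
    · have hzd := pvZip_drop bullets indent hle i hi
      by_cases hk : indent[i]'(lt_of_lt_of_le hi hle) = true
      · rw [pvInnerA, if_pos ⟨hi, by rw [pvGetD_lt _ _ _ (lt_of_lt_of_le hi hle)]; exact hk⟩]
        rw [ih (i+1) _ (by omega), hzd]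
        rw [pvGetD_lt _ _ _ hi]
        simp [List.takeWhile_cons, hk]
        omega
      · rw [pvInnerA, if_neg (by rw [pvGetD_lt _ _ _ (lt_of_lt_of_le hi hle)]; tauto)]
        rw [hzd]
        simp [List.takeWhile_cons, hk]
    · rw [pvZip_drop_nil bullets indent i (by omega)]
      rw [pvInnerA, if_neg (by tauto)]
      simp

theorem pvOuterA_spec (bullets : List String) (indent : List Bool)
    (hle : bullets.length ≤ indent.length) :
    ∀ (fuel i : Nat) (lines : List String), bullets.length < fuel + i →
      pvOuterA bullets indent fuel i lines =
        lines ++ pvCanon ((bullets.zip indent).drop i) := by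
  intro fuel
  induction fuel with
  | zero =>
    intro i lines h
    rw [pvZip_drop_nil bullets indent i (by omega)]
    simp [pvOuterA, pvCanon]
  | succ fuel ih =>
    intro i lines h
    by_cases hi : i < bullets.length
    · have hil : i < indent.length := lt_of_lt_of_le hi hle
      have hzd := pvZip_drop bullets indent hle i hi
      have hg := pvGetD_lt indent false i hil
      by_cases hk : indent[i]'hil = true
      · have hg' : PySem.List.pyGetD indent (i : Int) false = true := by rw [hg]; exact hk
        rw [pvOuterA]
        simp only [if_pos hi, hg', if_pos rfl]
        rw [pvInnerA_spec bullets indent hle bullets.length i _ (by omega)]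
        have ht : (((bullets.zip indent).drop i).takeWhile (·.2)) =
            (bullets[i], indent[i]'hil) :: (((bullets.zip indent).drop (i+1)).takeWhile (·.2)) := by
          rw [hzd]; simp [hk]
        rw [ht]
        rw [ih _ _ (by simp; omega)]
        have hd : (bullets.zip indent).drop
            (i + ((bullets[i], indent[i]'hil) :: (((bullets.zip indent).drop (i+1)).takeWhile (·.2))).length) =
            ((bullets.zip indent).drop (i+1)).dropWhile (·.2) := by
          rw [← pv_drop_takeWhile (·.2) ((bullets.zip indent).drop (i+1))]
          rw [List.drop_drop]
          congr 1
          simp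
          omega
        rw [hd, hzd]
        cases hki : indent[i]'hil
        · rw [hki] at hk; simp at hk
        · simp [pvCanon]
      · have hg' : ¬ (PySem.List.pyGetD indent (i : Int) false = true) := by rw [hg]; exact hk
        rw [pvOuterA]
        simp only [if_pos hi, if_neg hg']
        rw [ih _ _ (by omega), hzd]
        cases hki : indent[i]'hil
        · rw [pvGetD_lt bullets "" i hi]
          simp [pvCanon]
        · rw [hki] at hk; simp at hk
    · rw [pvZip_drop_nil bullets indent i (by omega)]
      rw [pvOuterA, if_neg hi]
      simp [pvCanon]

theorem pvGroup_eq_nil_iff (l : List (String × Bool)) : pvGroup l = [] ↔ l = [] := by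
  cases l with
  | nil => simp [pvGroup]
  | cons a t => obtain ⟨b, k⟩ := a; simp [pvGroup]

theorem pvAddRun_cons (r : Bool × List String) (rs : List (Bool × List String))
    (h : rs ≠ []) (k : Bool) (b : String) :
    pvAddRun (r :: rs) k b = r :: pvAddRun rs k b := by
  unfold pvAddRun
  cases hl : rs.getLast? with
  | none => simp [List.getLast?_eq_none_iff] at hl; exact absurd hl h
  | some last =>
    rw [show (r :: rs).getLast? = rs.getLast? from by
      cases rs with
      | nil => simp at h
      | cons x xs => simp [List.getLast?_cons_cons]]
    rw [hl]
    by_cases hkk : last.1 == k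
    · simp only [hkk]
      rw [List.dropLast_cons_of_ne_nil h]
      simp
    · simp [hkk]

theorem pvGroup_append (b : String) (k : Bool) : ∀ (l : List (String × Bool)),
    pvGroup (l ++ [(b, k)]) = pvAddRun (pvGroup l) k b := by
  intro l
  induction hn : l.length using Nat.strong_induction_on generalizing l with
  | _ n ih =>
  cases l with
  | nil => simp [pvGroup, pvAddRun]
  | cons hd rest =>
    obtain ⟨b0, k0⟩ := hd
    by_cases hall : ∀ p ∈ rest, (p.2 == k0) = true
    · have htw : rest.takeWhile (fun p => p.2 == k0) = rest := List.takeWhile_eq_self_iff.mpr hall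
      have hdw : rest.dropWhile (fun p => p.2 == k0) = [] := List.dropWhile_eq_nil_iff.mpr hall
      have hgl : pvGroup ((b0, k0) :: rest) = [(k0, b0 :: rest.map (·.1))] := by
        rw [pvGroup, htw, hdw]
        simp [pvGroup]
      by_cases hkk : k = k0
      · subst hkk
        rw [show (b0, k) :: rest ++ [(b, k)] = (b0, k) :: (rest ++ [(b, k)]) from rfl]
        rw [pvGroup]
        rw [List.takeWhile_append_of_pos hall, List.dropWhile_append_of_pos hall]
        simp only [List.takeWhile_cons, beq_self_eq_true]
        rw [List.dropWhile_cons_of_pos (by simp)]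
        simp [pvGroup, hgl, pvAddRun, List.takeWhile_nil, List.dropWhile_nil]
      · rw [show (b0, k0) :: rest ++ [(b, k)] = (b0, k0) :: (rest ++ [(b, k)]) from rfl]
        rw [pvGroup]
        rw [List.takeWhile_append_of_pos hall, List.dropWhile_append_of_pos hall]
        rw [List.takeWhile_cons_of_neg (by simp [hkk]), List.dropWhile_cons_of_neg (by simp [hkk])]
        simp [pvGroup, hgl, pvAddRun, hkk]
        exact fun hh => hkk hh.symm
    · have hdw : rest.dropWhile (fun p => p.2 == k0) ≠ [] := by
        rw [Ne, List.dropWhile_eq_nil_iff]; exact hall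
      have htw : (rest ++ [(b, k)]).takeWhile (fun p => p.2 == k0) = rest.takeWhile (fun p => p.2 == k0) := by
        rw [List.takeWhile_append]
        rw [if_neg (by
          intro hlen
          apply hdw
          rw [← pv_drop_takeWhile (fun p => p.2 == k0) rest, hlen, List.drop_length])]
      have hdwa : (rest ++ [(b, k)]).dropWhile (fun p => p.2 == k0) = rest.dropWhile (fun p => p.2 == k0) ++ [(b, k)] := by
        rw [List.dropWhile_append]
        simp [List.isEmpty_iff, hdw]
      rw [show (b0, k0) :: rest ++ [(b, k)] = (b0, k0) :: (rest ++ [(b, k)]) from rfl]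
      rw [pvGroup, htw, hdwa]
      rw [ih (rest.dropWhile (fun p => p.2 == k0)).length
        (by have := List.length_dropWhile_le (fun p => p.2 == k0) rest; simp at hn; omega) _ rfl]
      rw [pvGroup]
      rw [pvAddRun_cons _ _ (by rw [Ne, pvGroup_eq_nil_iff]; exact hdw)]

theorem pvRuns_spec (bullets : List String) (indent : List Bool)
    (hle : bullets.length ≤ indent.length) :
    ∀ n ≤ bullets.length,
      (List.range n).foldl
        (fun runs (i : Nat) => pvAddRun runs (PySem.List.pyGetD indent (i : Int) false)
                                (PySem.List.pyGetD bullets (i : Int) "")) [] =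
        pvGroup ((bullets.zip indent).take n) := by
  intro n
  induction n with
  | zero => intro _; simp [pvGroup]
  | succ n ih =>
    intro h
    rw [List.range_succ, List.foldl_append, ih (by omega)]
    simp only [List.foldl_cons, List.foldl_nil]
    rw [pvGetD_lt indent false n (by omega), pvGetD_lt bullets "" n (by omega)]
    rw [← pvGroup_append]
    congr 1
    rw [List.take_succ_eq_append_getElem (by simp; omega)]
    congr 1
    simp [List.getElem_zip]

theorem pvCanon_false_run : ∀ (ts r : List (String × Bool)), (∀ p ∈ ts, p.2 = false) →
    pvCanon (ts ++ r) = ts.map (fun p => pvCat "\t\\item " p.1) ++ pvCanon r := by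
  intro ts
  induction ts with
  | nil => simp
  | cons hd t ih =>
    intro r h
    obtain ⟨b, k⟩ := hd
    have hk : k = false := h (b, k) (by simp)
    subst hk
    rw [show ((b, false) :: t) ++ r = (b, false) :: (t ++ r) from rfl, pvCanon]
    rw [ih r (fun p hp => h p (by simp [hp]))]
    simp

theorem pvRender_spec : ∀ (zs : List (String × Bool)) (acc : List String),
    (pvGroup zs).foldl
      (fun lines r =>
        if r.1 then
          lines ++ ["\t\\begin{itemize}"] ++ r.2.map (fun b => pvCat "\t\t\\item " b)
                ++ ["\t\\end{itemize}"]
        else lines ++ r.2.map (fun b => pvCat "\t\\item " b)) acc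
      = acc ++ pvCanon zs := by
  intro zs
  induction hn : zs.length using Nat.strong_induction_on generalizing zs with
  | _ n ih =>
  cases zs with
  | nil => intro acc; simp [pvGroup, pvCanon]
  | cons hd rest =>
    intro acc
    obtain ⟨b, k⟩ := hd
    rw [pvGroup]
    simp only [List.foldl_cons]
    rw [ih (List.dropWhile (fun p => p.2 == k) rest).length
      (by have := List.length_dropWhile_le (fun p => p.2 == k) rest; simp at hn; omega) _ rfl]
    cases k with
    | true =>
      have hp : (fun p : String × Bool => p.2 == true) = (fun p => p.2) := by funext p; simp
      rw [hp]
      rw [show pvCanon ((b, true) :: rest) = "\t\\begin{itemize}" ::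
        ((pvCat "\t\t\\item " b :: (rest.takeWhile (·.2)).map (fun p => pvCat "\t\t\\item " p.1))
          ++ ["\t\\end{itemize}"] ++ pvCanon (rest.dropWhile (·.2))) from by rw [pvCanon]]
      simp [List.map_map, Function.comp_def]
    | false =>
      have hsplit : rest = rest.takeWhile (fun p => p.2 == false) ++ rest.dropWhile (fun p => p.2 == false) :=
        (List.takeWhile_append_dropWhile).symm
      rw [show pvCanon ((b, false) :: rest) = pvCat "\t\\item " b :: pvCanon rest from by rw [pvCanon]]
      rw [show pvCanon rest = (rest.takeWhile (fun p => p.2 == false)).map (fun p => pvCat "\t\\item " p.1)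
            ++ pvCanon (rest.dropWhile (fun p => p.2 == false)) from by
        conv_lhs => rw [hsplit]
        exact pvCanon_false_run _ _ (fun p hp => by simpa using List.mem_takeWhile_imp hp)]
      simp [List.map_map, Function.comp_def]

theorem pvFoldlCat_toList : ∀ (lines : List String) (acc : String),
    (lines.foldl (fun s l => pvCat (pvCat s l) "\n") acc).toList =
      acc.toList ++ (lines.map (fun l => l.toList ++ ['\n'])).flatten := by
  intro lines; induction lines with
  | nil => simp
  | cons l t ih => intro acc; simp [ih, pvCat_toList]

theorem pvJoin_toList : ∀ (lines : List String), lines ≠ [] →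
    (pvCat (PySem.Str.join "\n" lines) "\n").toList =
      (lines.map (fun l => l.toList ++ ['\n'])).flatten := by
  have aux : ∀ (ls : List (List Char)), ls ≠ [] →
      PySem.Chars.join ['\n'] ls ++ ['\n'] = (ls.map (· ++ ['\n'])).flatten := by
    intro ls
    induction ls with
    | nil => simp
    | cons a t ih =>
      intro _
      cases t with
      | nil => simp [PySem.Chars.join_singleton]
      | cons c u =>
        rw [PySem.Chars.join_cons_cons]
        rw [show ((a :: c :: u).map (· ++ ['\n'])).flatten =
          (a ++ ['\n']) ++ ((c :: u).map (· ++ ['\n'])).flatten from by simp]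
        rw [← ih (by simp)]
        simp
  intro lines h
  rw [pvCat_toList]
  have hb : (PySem.Str.join "\n" lines).toList =
      PySem.Chars.join "\n".toList (lines.map String.toList) := by simp [pysem]
  rw [hb]
  rw [show ("\n" : String).toList = ['\n'] from by decide]
  rw [aux (lines.map String.toList) (by simpa using h)]
  simp [List.map_map, Function.comp_def]

-- ===== VERDICT (by name: the statement is the Claim_ definition above) =====
theorem write_bullets_spec : Claim_equal_write_bullets := by
  intro bullets indent _ hpre
  unfold Spec_write_bullets
  have hle : bullets.length ≤ indent.length := hpre
  have hzl : (bullets.zip indent).length = bullets.length := by simp; omega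
  apply String.toList_inj.mp
  simp only [write_bullets, write_bullets_alt]
  rw [pvOuterA_spec bullets indent hle (bullets.length + 1) 0 _ (by omega)]
  rw [pvRuns_spec bullets indent hle bullets.length (le_refl _)]
  rw [show (bullets.zip indent).take bullets.length = bullets.zip indent from by
    apply List.take_of_length_le; omega]
  rw [pvRender_spec]
  rw [List.drop_zero]
  rw [pvFoldlCat_toList]
  rw [pvJoin_toList _ (by simp)]
  simp
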